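-- pv_equiv track=rewrite | github.com/ArshErgon/CODEFORCE | WrongSubtraction.py | solve
-- ===== SOURCE A (Python) =====
-- def solve(n, number):
--     while n >= 1:
--         if number % 10 == 0:
--             number = shortTheNumber(number)
--         else:
--             number -= 1
--         n -= 1
--
--     return number
--
-- def shortTheNumber(num):
--     return num // 10
-- ===== SOURCE B (Python) =====
-- def solve(n, number):
--     # Batch the unit subtractions: jump straight to the next multiple of 10
--     # (capped by the remaining step budget n); a zero number is a fixpoint.
--     while n >= 1:
--         if number == 0:
--             return 0
--         r = number % 10
--         if r == 0:
--             number //= 10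
--             n -= 1
--         else:
--             step = r if r <= n else n
--             number -= step
--             n -= step
--     return number
-- ===== Notes on version B (the rewrite author's own statement) =====
-- stated objective: faster
-- what changed: Instead of one loop iteration per step, B batches all unit subtractions down to the next multiple of 10 into a single arithmetic jump (capped by the remaining budget) and short-circuits the zero fixpoint, so the budget n is consumed in O(log|number|)-sized chunks for nonnegative numbers.
import Mathlib
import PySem

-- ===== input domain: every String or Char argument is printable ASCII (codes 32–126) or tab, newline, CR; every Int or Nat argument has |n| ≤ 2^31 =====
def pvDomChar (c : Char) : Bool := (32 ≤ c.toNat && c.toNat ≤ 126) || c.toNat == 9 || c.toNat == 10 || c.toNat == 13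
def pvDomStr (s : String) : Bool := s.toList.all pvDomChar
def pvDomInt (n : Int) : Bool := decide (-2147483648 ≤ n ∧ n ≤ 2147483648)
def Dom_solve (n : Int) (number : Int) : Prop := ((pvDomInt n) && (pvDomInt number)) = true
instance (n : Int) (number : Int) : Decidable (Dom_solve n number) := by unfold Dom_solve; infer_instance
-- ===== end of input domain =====

-- B batches the unit subtractions of A into one arithmetic jump (objective: faster, measured).

-- ===== PORT A =====
-- while n >= 1: one step per iteration; fuel = n.toNat (the loop runs exactly max n 0 times)
def solveLoopA : Nat → Int → Int
  | 0, number => number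
  | k + 1, number =>
    if PySem.Int.mod number 10 = 0 then solveLoopA k (PySem.Int.floordiv number 10)
    else solveLoopA k (number - 1)

def solve (n : Int) (number : Int) : Int := solveLoopA n.toNat number

-- ===== PORT B =====
def solveLoopB (n : Int) (number : Int) : Int :=
  if hn : n ≥ 1 then
    if number = 0 then 0
    else
      let r := PySem.Int.mod number 10
      if hr : r = 0 then solveLoopB (n - 1) (PySem.Int.floordiv number 10)
      else
        let step := if r ≤ n then r else n
        solveLoopB (n - step) (number - step)
  else number
termination_by n.toNat
decreasing_by
  · omega
  · have h0 : 0 ≤ PySem.Int.mod number 10 := by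
      rw [PySem.Int.mod_eq_emod_of_pos (by norm_num)]; exact Int.emod_nonneg _ (by norm_num)
    have hr' : PySem.Int.mod number 10 ≠ 0 := hr
    split <;> omega

def solve_alt (n : Int) (number : Int) : Int := solveLoopB n number

-- ===== PRECONDITION & SPEC =====
def Spec_solve (n : Int) (number : Int) (out : Int) : Prop := out = solve_alt n number
instance (n : Int) (number : Int) (out : Int) : Decidable (Spec_solve n number out) := by unfold Spec_solve; infer_instance

-- ===== CLAIM (what is proved, stated in full; the proofs are below) =====
def Claim_equal_solve : Prop := ∀ (n : Int) (number : Int), Dom_solve n number → Spec_solve n number (solve n number)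

-- ===== LEMMAS AND PROOFS =====

-- 0 is a fixpoint of A's loop
theorem solveLoopA_zero (k : Nat) : solveLoopA k 0 = 0 := by
  induction k with
  | zero => rfl
  | succ k ih => simp [solveLoopA, PySem.Int.mod, PySem.Int.floordiv, ih]

-- s unit subtractions, each staying off a multiple of 10, equal s iterations of A's loop
theorem solveLoopA_sub (s : Nat) : ∀ (k : Nat) (number : Int), s ≤ k →
    (s : Int) ≤ PySem.Int.mod number 10 →
    solveLoopA k number = solveLoopA (k - s) (number - s) := by
  induction s with
  | zero => intro k number _ _; simp
  | succ s ih =>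
    intro k number hk hs
    obtain ⟨k', rfl⟩ : ∃ k', k = k' + 1 := ⟨k - 1, by omega⟩
    rw [PySem.Int.mod_eq_emod_of_pos (by norm_num)] at hs
    have hm : PySem.Int.mod number 10 ≠ 0 := by
      rw [PySem.Int.mod_eq_emod_of_pos (by norm_num)]
      push_cast at hs; omega
    rw [solveLoopA, if_neg hm]
    rw [ih k' (number - 1) (by omega) (by
      rw [PySem.Int.mod_eq_emod_of_pos (by norm_num)]
      push_cast at hs ⊢; omega)]
    congr 1
    · omega
    · push_cast; ring

theorem loopB_eq_loopA (n number : Int) : solveLoopB n number = solveLoopA n.toNat number := by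
  induction n, number using solveLoopB.induct with
  | case1 n hn =>
    rw [solveLoopB, dif_pos hn, if_pos rfl, solveLoopA_zero]
  | case2 n number hn hnz r hr ih =>
    rw [solveLoopB, dif_pos hn, if_neg hnz, dif_pos hr]
    obtain ⟨k', hk⟩ : ∃ k', n.toNat = k' + 1 := ⟨n.toNat - 1, by omega⟩
    rw [hk, solveLoopA, if_pos hr, ih]
    congr 1
    omega
  | case3 n number hn hnz r hr step ih =>
    rw [solveLoopB, dif_pos hn, if_neg hnz, dif_neg hr]
    have h0 : 0 ≤ r := by
      show 0 ≤ PySem.Int.mod number 10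
      rw [PySem.Int.mod_eq_emod_of_pos (by norm_num)]; exact Int.emod_nonneg _ (by norm_num)
    have hs1 : 1 ≤ step := by simp only [step]; split <;> omega
    have hsn : step ≤ n := by simp only [step]; split <;> omega
    have hsr : step ≤ r := by simp only [step]; split <;> omega
    have key := solveLoopA_sub step.toNat n.toNat number (by omega)
      (by rw [Int.toNat_of_nonneg (by omega)]; exact hsr)
    rw [Int.toNat_of_nonneg (by omega : (0:Int) ≤ step)] at key
    show solveLoopB (n - step) (number - step) = solveLoopA n.toNat number
    rw [ih, key]
    congr 1
    omega
  | case4 n number hn =>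
    rw [solveLoopB, dif_neg hn, Int.toNat_of_nonpos (by omega)]
    rfl

-- ===== VERDICT (by name: the statement is the Claim_ definition above) =====
theorem solve_spec : Claim_equal_solve := by
  intro n number _
  unfold Spec_solve solve solve_alt
  exact (loopB_eq_loopA n number).symm
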